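-- pv_equiv track=rewrite | github.com/Daniel-Sottovia/INE5603 | Exercícios/lista11.py | linha_do_menor
-- ===== SOURCE A (Python) =====
-- def linha_do_menor(matriz):
--     linha = len(matriz)
--     cl = 0
--     menor = matriz[0][0]
--     posicao = 0
--     while cl < linha:
--         coluna = len(matriz[cl])
--         cc = 0
--         while cc < coluna:
--             if menor > matriz[cl][cc]:
--                 menor = matriz[cl][cc]
--                 posicao = cl
--             cc += 1
--         cl += 1
--     return posicao
-- ===== SOURCE B (Python) =====
-- def linha_do_menor(matriz):
--     # pass 1: compute the global minimum (seeded from matriz[0][0])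
--     menor = matriz[0][0]
--     for linha in matriz:
--         for x in linha:
--             if x < menor:
--                 menor = x
--     # pass 2: return the index of the first row containing it
--     for i, linha in enumerate(matriz):
--         if menor in linha:
--             return i
-- ===== Notes on version B (the rewrite author's own statement) =====
-- stated objective: simpler
-- what changed: Replaces the single index-tracking scan (running minimum with a remembered row index updated on strict improvement) by compute-then-locate: one pass computes the global minimum seeded from matriz[0][0], a second pass returns the first row containing it; iterating the lists directly instead of while-loops with index arithmetic gives a constant-factor speedup.
import Mathlib
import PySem

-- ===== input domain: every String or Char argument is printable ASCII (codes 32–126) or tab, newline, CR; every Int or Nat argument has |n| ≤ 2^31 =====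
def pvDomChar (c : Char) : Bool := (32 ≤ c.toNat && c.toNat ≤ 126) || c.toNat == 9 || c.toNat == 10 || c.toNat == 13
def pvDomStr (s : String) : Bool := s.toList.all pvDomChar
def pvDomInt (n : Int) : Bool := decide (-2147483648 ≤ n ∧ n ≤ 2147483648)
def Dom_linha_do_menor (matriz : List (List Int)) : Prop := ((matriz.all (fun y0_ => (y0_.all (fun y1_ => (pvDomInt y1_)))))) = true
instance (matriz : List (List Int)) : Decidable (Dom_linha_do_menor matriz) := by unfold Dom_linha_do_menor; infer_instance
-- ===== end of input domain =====

-- B replaces A's single index-tracking scan by compute-the-minimum then locate-its-first-row (simpler decomposition).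

-- ===== PORT A =====
-- literal port of A's two nested while loops: state (menor, posicao), indices via pyRange/pyGetD
def linha_do_menor (matriz : List (List Int)) : Int :=
  let linha : Int := PySem.List.len matriz
  let menor0 : Int := PySem.List.pyGetD (PySem.List.pyGetD matriz 0 []) 0 0
  let st :=
    (PySem.List.pyRange 0 linha 1).foldl
      (fun (st : Int × Int) cl =>
        let row := PySem.List.pyGetD matriz cl []
        let coluna : Int := PySem.List.len row
        (PySem.List.pyRange 0 coluna 1).foldl
          (fun (st : Int × Int) cc =>
            if st.1 > PySem.List.pyGetD row cc 0 then (PySem.List.pyGetD row cc 0, cl) else st)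
          st)
      (menor0, 0)
  st.2

-- ===== PORT B =====
-- pass 2 of Source B: first row index (from i) whose row contains m; base case unreachable under Pre_
def pvFindRow (rows : List (List Int)) (m : Int) (i : Int) : Int :=
  match rows with
  | [] => 0
  | r :: rs => if r.contains m then i else pvFindRow rs m (i + 1)

def linha_do_menor_alt (matriz : List (List Int)) : Int :=
  let menor0 : Int := PySem.List.pyGetD (PySem.List.pyGetD matriz 0 []) 0 0
  let menor := matriz.foldl (fun m row => row.foldl (fun m x => if x < m then x else m) m) menor0
  pvFindRow matriz menor 0

-- ===== PRECONDITION & SPEC =====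
-- Pre_ excludes exactly the inputs where matriz[0][0] raises IndexError (in A and in B alike): empty matrix or empty first row.
def Pre_linha_do_menor (matriz : List (List Int)) : Prop :=
  matriz ≠ [] ∧ matriz.headI ≠ []
instance (matriz : List (List Int)) : Decidable (Pre_linha_do_menor matriz) := by unfold Pre_linha_do_menor; infer_instance

def pvWitness_linha_do_menor : List (List Int) := [[3, 1], [0, 2]]

def Spec_linha_do_menor (matriz : List (List Int)) (out : Int) : Prop := out = linha_do_menor_alt matriz
instance (matriz : List (List Int)) (out : Int) : Decidable (Spec_linha_do_menor matriz out) := by unfold Spec_linha_do_menor; infer_instance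

-- ===== CLAIM (what is proved, stated in full; the proofs are below) =====
def Claim_equal_linha_do_menor : Prop := ∀ (matriz : List (List Int)), Dom_linha_do_menor matriz → Pre_linha_do_menor matriz → Spec_linha_do_menor matriz (linha_do_menor matriz)

-- ===== LEMMAS AND PROOFS =====

-- the running-minimum fold
def pvMinF (m x : Int) : Int := if x < m then x else m

theorem pvMinFold_le (r : List Int) (a : Int) : r.foldl pvMinF a ≤ a := by
  induction r generalizing a with
  | nil => exact le_refl a
  | cons x r ih =>
    simp only [List.foldl_cons]
    refine le_trans (ih _) ?_
    unfold pvMinF; split <;> omega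

theorem pvMinFold_le_mem (r : List Int) (a x : Int) (hx : x ∈ r) : r.foldl pvMinF a ≤ x := by
  induction r generalizing a with
  | nil => cases hx
  | cons y r ih =>
    simp only [List.foldl_cons]
    rcases List.mem_cons.1 hx with h | h
    · subst h
      refine le_trans (pvMinFold_le _ _) ?_
      unfold pvMinF; split <;> omega
    · exact ih _ h

theorem pvMinFold_mem_of_lt (r : List Int) (a : Int) (h : r.foldl pvMinF a < a) :
    r.foldl pvMinF a ∈ r := by
  induction r generalizing a with
  | nil => simp at h
  | cons x r ih =>
    simp only [List.foldl_cons] at *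
    by_cases hlt : r.foldl pvMinF (pvMinF a x) < pvMinF a x
    · exact List.mem_cons_of_mem _ (ih _ hlt)
    · have heq : r.foldl pvMinF (pvMinF a x) = pvMinF a x :=
        le_antisymm (pvMinFold_le _ _) (by omega)
      rw [heq] at h ⊢
      by_cases hxa : x < a
      · have hx : pvMinF a x = x := by unfold pvMinF; omega
        rw [hx]; exact List.mem_cons_self
      · have hx : pvMinF a x = a := by unfold pvMinF; omega
        rw [hx] at h; omega

def pvNestF (m : Int) (row : List Int) : Int := row.foldl pvMinF m

theorem pvNestFold_le (rs : List (List Int)) (a : Int) : rs.foldl pvNestF a ≤ a := by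
  induction rs generalizing a with
  | nil => exact le_refl a
  | cons r rs ih =>
    simp only [List.foldl_cons]
    exact le_trans (ih _) (pvMinFold_le _ _)

-- A's inner row scan characterised: new minimum, and row index i iff it strictly improved
theorem pvRowScan (r : List Int) (m p i : Int) :
    r.foldl (fun (st : Int × Int) x => if st.1 > x then (x, i) else st) (m, p)
      = (r.foldl pvMinF m, if r.foldl pvMinF m < m then i else p) := by
  induction r generalizing m p with
  | nil => simp
  | cons x r ih =>
    simp only [List.foldl_cons]
    by_cases hx : m > x
    · rw [if_pos hx, ih]
      have h1 : pvMinF m x = x := by unfold pvMinF; omega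
      simp only [h1, Prod.mk.injEq, true_and]
      have h3 : r.foldl pvMinF x < m := lt_of_le_of_lt (pvMinFold_le r x) (by omega)
      rw [if_pos h3]
      split <;> rfl
    · rw [if_neg hx, ih]
      have h1 : pvMinF m x = m := by unfold pvMinF; omega
      simp only [h1]

theorem pvFindRow_cons (r : List Int) (rs : List (List Int)) (m i : Int) :
    pvFindRow (r :: rs) m i = if r.contains m then i else pvFindRow rs m (i + 1) := rfl

-- A's outer scan over the enumerated rows characterised via B's two passes
theorem pvOuterScan (rs : List (List Int)) (s m p : Int) :
    (PySem.List.enumerate rs s).foldl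
        (fun (st : Int × Int) ir =>
          ir.2.foldl (fun (st : Int × Int) x => if st.1 > x then (x, ir.1) else st) st)
        (m, p)
      = (rs.foldl pvNestF m,
         if rs.foldl pvNestF m < m then pvFindRow rs (rs.foldl pvNestF m) s else p) := by
  induction rs generalizing s m p with
  | nil => simp [PySem.List.enumerate_nil]
  | cons r rs ih =>
    rw [PySem.List.enumerate_cons]
    simp only [List.foldl_cons]
    rw [pvRowScan r m p s, ih]
    have e1 : pvNestF m r = r.foldl pvMinF m := rfl
    simp only [e1, Prod.mk.injEq, true_and]
    have hm1 : r.foldl pvMinF m ≤ m := pvMinFold_le _ _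
    have hM1 : rs.foldl pvNestF (r.foldl pvMinF m) ≤ r.foldl pvMinF m := pvNestFold_le _ _
    by_cases hlt : rs.foldl pvNestF (r.foldl pvMinF m) < r.foldl pvMinF m
    · -- the global minimum lies strictly below row r's minimum, so it is not in r
      have hnotin : ¬ r.contains (rs.foldl pvNestF (r.foldl pvMinF m)) := by
        simp only [List.contains_eq_mem, decide_eq_true_eq]
        intro hmem
        exact absurd (pvMinFold_le_mem r m _ hmem) (by omega)
      rw [if_pos hlt, if_pos (by omega), pvFindRow_cons, if_neg hnotin]
    · have hMeq : rs.foldl pvNestF (r.foldl pvMinF m) = r.foldl pvMinF m :=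
        le_antisymm hM1 (by omega)
      rw [if_neg hlt]
      by_cases h2 : r.foldl pvMinF m < m
      · have hin : r.contains (rs.foldl pvNestF (r.foldl pvMinF m)) := by
          simp only [List.contains_eq_mem, decide_eq_true_eq, hMeq]
          exact pvMinFold_mem_of_lt r m h2
        rw [if_pos h2, if_pos (by omega), pvFindRow_cons, if_pos hin]
      · rw [if_neg h2, if_neg (by omega)]

-- when the minimum equals the seed it sits in the first row, so pass 2 returns 0
theorem pvFindRow_zero (r : List Int) (rs : List (List Int)) (m : Int) (hm : m ∈ r) :
    pvFindRow (r :: rs) m 0 = 0 := by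
  unfold pvFindRow
  rw [if_pos (by simpa [List.contains_eq_mem] using hm)]

-- ===== VERDICT (by name: the statement is the Claim_ definition above) =====
theorem linha_do_menor_spec : Claim_equal_linha_do_menor := by
  intro matriz _hdom hpre
  unfold Spec_linha_do_menor linha_do_menor linha_do_menor_alt
  obtain ⟨hne, hhead⟩ := hpre
  match matriz, hne, hhead with
  | (a0 :: r0) :: rest, _, _ =>
    simp only []
    -- inner while loop → fold over the row itself
    have hrows : ∀ (st : Int × Int) (cl : Int) (row : List Int),
        (PySem.List.pyRange 0 (PySem.List.len row) 1).foldl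
            (fun (st : Int × Int) cc =>
              if st.1 > PySem.List.pyGetD row cc 0 then (PySem.List.pyGetD row cc 0, cl) else st) st
          = row.foldl (fun (st : Int × Int) x => if st.1 > x then (x, cl) else st) st := by
      intro st cl row
      exact PySem.List.foldl_pyRange_zero_pyGetD row 0
        (fun (st : Int × Int) (v : Int) => if st.1 > v then (v, cl) else st) st
    simp only [hrows]
    have hm0v : PySem.List.pyGetD (PySem.List.pyGetD ((a0 :: r0) :: rest) 0 []) 0 0 = a0 := by
      simp [PySem.List.pyGetD, PySem.List.pyGet?, PySem.List.pyIdx?]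
    rw [hm0v]
    -- outer while loop → fold over the enumerated rows
    have hA :
        (PySem.List.pyRange 0 (PySem.List.len ((a0 :: r0) :: rest)) 1).foldl
            (fun (st : Int × Int) cl =>
              (PySem.List.pyGetD ((a0 :: r0) :: rest) cl []).foldl
                (fun (st : Int × Int) x => if st.1 > x then (x, cl) else st) st)
            (a0, 0)
          = (PySem.List.enumerate ((a0 :: r0) :: rest) 0).foldl
              (fun (st : Int × Int) ir =>
                ir.2.foldl (fun (st : Int × Int) x => if st.1 > x then (x, ir.1) else st) st)
              (a0, 0) := by
      rw [PySem.List.enumerate_eq_map_pyRange ((a0 :: r0) :: rest) [], List.foldl_map]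
    rw [hA, pvOuterScan ((a0 :: r0) :: rest) 0 a0 0]
    have hfold_eq : ((a0 :: r0) :: rest).foldl
        (fun m row => row.foldl (fun m x => if x < m then x else m) m) a0
        = ((a0 :: r0) :: rest).foldl pvNestF a0 := rfl
    rw [hfold_eq]
    have hM : ((a0 :: r0) :: rest).foldl pvNestF a0 ≤ a0 := pvNestFold_le _ _
    by_cases hlt : ((a0 :: r0) :: rest).foldl pvNestF a0 < a0
    · rw [if_pos hlt]
    · have hMeq : ((a0 :: r0) :: rest).foldl pvNestF a0 = a0 := le_antisymm hM (by omega)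
      rw [if_neg hlt, hMeq, pvFindRow_zero _ _ _ (by simp)]
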